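-- pv_equiv track=rewrite | github.com/woodlandspirit/juego-codigo-secreto | TPO_Grupo 03 (Código Secreto).py | comparacion
-- ===== SOURCE A (Python) =====
-- def comparacion(numero,codigo_secreto):
--     salida_intermedia = ""
--     salida_final=""
--
--     for i in range(4): # 1° Etapa de comparación (generación de salida_intermedia)
--         bandera = True
--         for j in range(4):
--             if numero[i] == codigo_secreto[j]: # <<<<<<<<<<<<<<<<<<<<<<<<<<<<<< CADENAS DE CARACTERES >>>>>>>>>>>>>>>>>>>>>>>>>>>>>>
--                 if i == j:
--                     salida_intermedia += "B"
--                 else: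
--                     salida_intermedia += "R"
--                 bandera = False
--         if bandera:
--             salida_intermedia += "M"
--
--     for letra in salida_intermedia: # 2° Etapa de comparación (generación de salida_final)
--         if letra == "B":
--             salida_final += letra
--
--     for letra in salida_intermedia:
--         if letra == "R":
--             salida_final += letra
--
--     for letra in salida_intermedia:
--         if letra == "M":
--             salida_final += letra
--
--     return salida_final
-- ===== SOURCE B (Python) =====
-- def comparacion(numero, codigo_secreto):
--     nB = sum(1 for i in range(4) if numero[i] == codigo_secreto[i])
--     nR = sum(1 for i in range(4) for j in range(4)
--              if i != j and numero[i] == codigo_secreto[j])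
--     nM = sum(1 for i in range(4)
--              if all(numero[i] != codigo_secreto[j] for j in range(4)))
--     return "B" * nB + "R" * nR + "M" * nM
-- ===== Notes on version B (the rewrite author's own statement) =====
-- stated objective: simpler
-- what changed: Replaces A's intermediate per-position string plus three grouping passes with three direct integer counts (exact B, cross R, no-match M) and builds the result as 'B'*nB+'R'*nR+'M'*nM.
import Mathlib
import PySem

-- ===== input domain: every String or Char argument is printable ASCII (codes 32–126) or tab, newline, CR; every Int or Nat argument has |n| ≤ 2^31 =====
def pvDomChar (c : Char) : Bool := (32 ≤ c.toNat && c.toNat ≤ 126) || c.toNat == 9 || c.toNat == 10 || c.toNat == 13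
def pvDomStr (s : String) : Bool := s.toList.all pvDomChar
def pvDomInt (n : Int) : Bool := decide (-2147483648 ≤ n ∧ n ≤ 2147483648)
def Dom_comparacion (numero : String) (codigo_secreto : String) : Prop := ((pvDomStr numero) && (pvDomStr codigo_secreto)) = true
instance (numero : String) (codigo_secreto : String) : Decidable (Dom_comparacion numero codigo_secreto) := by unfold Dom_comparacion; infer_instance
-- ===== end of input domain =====

-- B replaces A's intermediate marker string and its three grouping passes by three direct
-- counts (exact, cross, no-match) and builds the result from them; objective: simpler.

-- ===== PORT A =====
-- inner-loop body of A's first stage (the j-loop step), named for the proofs below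
def pasoA (n c : List Char) (i : Nat) (st : List Char × Bool) (j : Nat) : List Char × Bool :=
  if PySem.List.pyGet? n (i : Int) = PySem.List.pyGet? c (j : Int) then
    if i = j then (st.1 ++ ['B'], false) else (st.1 ++ ['R'], false)
  else st

-- A's body over the code points of the two strings
def comparacionCore (n c : List Char) : List Char :=
  let salida_intermedia := (List.range 4).foldl (fun (acc : List Char) (i : Nat) =>
    let st := (List.range 4).foldl (pasoA n c i) (acc, true)
    if st.2 then st.1 ++ ['M'] else st.1) []
  let f1 := salida_intermedia.foldl (fun acc l => if l = 'B' then acc ++ [l] else acc) []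
  let f2 := salida_intermedia.foldl (fun acc l => if l = 'R' then acc ++ [l] else acc) f1
  salida_intermedia.foldl (fun acc l => if l = 'M' then acc ++ [l] else acc) f2

def comparacion (numero : String) (codigo_secreto : String) : String :=
  String.ofList (comparacionCore numero.toList codigo_secreto.toList)

-- ===== PORT B =====
-- B's body over the code points of the two strings
def comparacionAltCore (n c : List Char) : List Char :=
  let nB := (List.range 4).countP (fun (i : Nat) =>
      PySem.List.pyGet? n (i : Int) == PySem.List.pyGet? c (i : Int))
  let nR := ((List.range 4).map (fun (i : Nat) => (List.range 4).countP (fun (j : Nat) =>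
      decide (i ≠ j) && (PySem.List.pyGet? n (i : Int) == PySem.List.pyGet? c (j : Int))))).sum
  let nM := (List.range 4).countP (fun (i : Nat) => (List.range 4).all (fun (j : Nat) =>
      !(PySem.List.pyGet? n (i : Int) == PySem.List.pyGet? c (j : Int))))
  List.replicate nB 'B' ++ (List.replicate nR 'R' ++ List.replicate nM 'M')

def comparacion_alt (numero : String) (codigo_secreto : String) : String :=
  String.ofList (comparacionAltCore numero.toList codigo_secreto.toList)

-- ===== PRECONDITION & SPEC =====
-- Pre_: both strings have at least 4 characters; on shorter input the Python A raises IndexError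
-- (and B raises there too).
def Pre_comparacion (numero : String) (codigo_secreto : String) : Prop :=
  4 ≤ numero.toList.length ∧ 4 ≤ codigo_secreto.toList.length
instance (numero : String) (codigo_secreto : String) : Decidable (Pre_comparacion numero codigo_secreto) := by unfold Pre_comparacion; infer_instance
def pvWitness_comparacion : String × String := ("1234", "1359")
def Spec_comparacion (numero : String) (codigo_secreto : String) (out : String) : Prop := out = comparacion_alt numero codigo_secreto
instance (numero : String) (codigo_secreto : String) (out : String) : Decidable (Spec_comparacion numero codigo_secreto out) := by unfold Spec_comparacion; infer_instance

-- ===== CLAIM (what is proved, stated in full; the proofs are below) =====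
def Claim_equal_comparacion : Prop := ∀ (numero : String) (codigo_secreto : String), Dom_comparacion numero codigo_secreto → Pre_comparacion numero codigo_secreto → Spec_comparacion numero codigo_secreto (comparacion numero codigo_secreto)

-- ===== LEMMAS AND PROOFS =====

-- the marker list produced for one position i, starting from the empty accumulator
def rowA (n c : List Char) (i : Nat) : List Char :=
  let st := (List.range 4).foldl (pasoA n c i) ([], true)
  if st.2 then st.1 ++ ['M'] else st.1

-- the inner fold only appends to the accumulator, so the accumulator factors out
lemma row_factor (n c : List Char) (i : Nat) (js : List Nat) :
    ∀ (acc : List Char) (b : Bool),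
    js.foldl (pasoA n c i) (acc, b)
      = (acc ++ (js.foldl (pasoA n c i) ([], b)).1, (js.foldl (pasoA n c i) ([], b)).2) := by
  induction js with
  | nil => intro acc b; simp
  | cons j js ih =>
    intro acc b
    simp only [List.foldl_cons, pasoA]
    split_ifs with h1 h2
    · rw [ih (acc ++ ['B']), ih ([] ++ ['B'])]; simp
    · rw [ih (acc ++ ['R']), ih ([] ++ ['R'])]; simp
    · rw [ih acc]

lemma step_eq (n c : List Char) (acc : List Char) (i : Nat) :
    (if ((List.range 4).foldl (pasoA n c i) (acc, true)).2
     then ((List.range 4).foldl (pasoA n c i) (acc, true)).1 ++ ['M']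
     else ((List.range 4).foldl (pasoA n c i) (acc, true)).1) = acc ++ rowA n c i := by
  simp only [rowA, row_factor n c i (List.range 4) acc true]
  split <;> simp

-- the intermediate string is the concatenation of the four per-position rows
lemma si_eq (n c : List Char) :
    (List.range 4).foldl (fun (acc : List Char) (i : Nat) =>
      let st := (List.range 4).foldl (pasoA n c i) (acc, true)
      if st.2 then st.1 ++ ['M'] else st.1) []
      = rowA n c 0 ++ (rowA n c 1 ++ (rowA n c 2 ++ rowA n c 3)) := by
  have h4 : List.range 4 = [0, 1, 2, 3] := by decide
  set f := (fun (acc : List Char) (i : Nat) =>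
      let st := (List.range 4).foldl (pasoA n c i) (acc, true)
      if st.2 then st.1 ++ ['M'] else st.1) with hf
  have hg : ∀ (acc : List Char) (i : Nat), f acc i = acc ++ rowA n c i := by
    intro acc i
    rw [hf]
    exact step_eq n c acc i
  conv_lhs => rw [h4]
  simp only [List.foldl_cons, List.foldl_nil, hg]
  simp

lemma row_count0 (a0 a1 a2 a3 b0 b1 b2 b3 : Char) (ra rb : List Char) :
    (rowA (a0::a1::a2::a3::ra) (b0::b1::b2::b3::rb) 0).count 'B' = (if a0 = b0 then 1 else 0)
    ∧ (rowA (a0::a1::a2::a3::ra) (b0::b1::b2::b3::rb) 0).count 'R' = (if a0 = b1 then 1 else 0) + (if a0 = b2 then 1 else 0) + (if a0 = b3 then 1 else 0)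
    ∧ (rowA (a0::a1::a2::a3::ra) (b0::b1::b2::b3::rb) 0).count 'M' = (if ¬(a0 = b0) ∧ ¬(a0 = b1) ∧ ¬(a0 = b2) ∧ ¬(a0 = b3) then 1 else 0) := by
  have h4 : List.range 4 = [0, 1, 2, 3] := by decide
  have e : PySem.List.pyGet? (a0::a1::a2::a3::ra) ((0:Nat):Int) = some a0 := by
    rw [PySem.List.pyGet?_natCast]; rfl
  have f0 : PySem.List.pyGet? (b0::b1::b2::b3::rb) ((0:Nat):Int) = some b0 := by
    rw [PySem.List.pyGet?_natCast]; rfl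
  have f1 : PySem.List.pyGet? (b0::b1::b2::b3::rb) ((1:Nat):Int) = some b1 := by
    rw [PySem.List.pyGet?_natCast]; rfl
  have f2 : PySem.List.pyGet? (b0::b1::b2::b3::rb) ((2:Nat):Int) = some b2 := by
    rw [PySem.List.pyGet?_natCast]; rfl
  have f3 : PySem.List.pyGet? (b0::b1::b2::b3::rb) ((3:Nat):Int) = some b3 := by
    rw [PySem.List.pyGet?_natCast]; rfl
  simp only [rowA, h4, List.foldl_cons, List.foldl_nil, pasoA, e, f0, f1, f2, f3,
    Option.some.injEq, (show ((0:Nat) = 0) = True by simp), (show ((0:Nat) = 1) = False by simp), (show ((0:Nat) = 2) = False by simp), (show ((0:Nat) = 3) = False by simp), if_true, if_false]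
  clear e f0 f1 f2 f3 h4
  refine ⟨?_, ?_, ?_⟩ <;> · split_ifs <;> simp_all

lemma row_count1 (a0 a1 a2 a3 b0 b1 b2 b3 : Char) (ra rb : List Char) :
    (rowA (a0::a1::a2::a3::ra) (b0::b1::b2::b3::rb) 1).count 'B' = (if a1 = b1 then 1 else 0)
    ∧ (rowA (a0::a1::a2::a3::ra) (b0::b1::b2::b3::rb) 1).count 'R' = (if a1 = b0 then 1 else 0) + (if a1 = b2 then 1 else 0) + (if a1 = b3 then 1 else 0)
    ∧ (rowA (a0::a1::a2::a3::ra) (b0::b1::b2::b3::rb) 1).count 'M' = (if ¬(a1 = b0) ∧ ¬(a1 = b1) ∧ ¬(a1 = b2) ∧ ¬(a1 = b3) then 1 else 0) := by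
  have h4 : List.range 4 = [0, 1, 2, 3] := by decide
  have e : PySem.List.pyGet? (a0::a1::a2::a3::ra) ((1:Nat):Int) = some a1 := by
    rw [PySem.List.pyGet?_natCast]; rfl
  have f0 : PySem.List.pyGet? (b0::b1::b2::b3::rb) ((0:Nat):Int) = some b0 := by
    rw [PySem.List.pyGet?_natCast]; rfl
  have f1 : PySem.List.pyGet? (b0::b1::b2::b3::rb) ((1:Nat):Int) = some b1 := by
    rw [PySem.List.pyGet?_natCast]; rfl
  have f2 : PySem.List.pyGet? (b0::b1::b2::b3::rb) ((2:Nat):Int) = some b2 := by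
    rw [PySem.List.pyGet?_natCast]; rfl
  have f3 : PySem.List.pyGet? (b0::b1::b2::b3::rb) ((3:Nat):Int) = some b3 := by
    rw [PySem.List.pyGet?_natCast]; rfl
  simp only [rowA, h4, List.foldl_cons, List.foldl_nil, pasoA, e, f0, f1, f2, f3,
    Option.some.injEq, (show ((1:Nat) = 0) = False by simp), (show ((1:Nat) = 1) = True by simp), (show ((1:Nat) = 2) = False by simp), (show ((1:Nat) = 3) = False by simp), if_true, if_false]
  clear e f0 f1 f2 f3 h4
  refine ⟨?_, ?_, ?_⟩ <;> · split_ifs <;> simp_all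

lemma row_count2 (a0 a1 a2 a3 b0 b1 b2 b3 : Char) (ra rb : List Char) :
    (rowA (a0::a1::a2::a3::ra) (b0::b1::b2::b3::rb) 2).count 'B' = (if a2 = b2 then 1 else 0)
    ∧ (rowA (a0::a1::a2::a3::ra) (b0::b1::b2::b3::rb) 2).count 'R' = (if a2 = b0 then 1 else 0) + (if a2 = b1 then 1 else 0) + (if a2 = b3 then 1 else 0)
    ∧ (rowA (a0::a1::a2::a3::ra) (b0::b1::b2::b3::rb) 2).count 'M' = (if ¬(a2 = b0) ∧ ¬(a2 = b1) ∧ ¬(a2 = b2) ∧ ¬(a2 = b3) then 1 else 0) := by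
  have h4 : List.range 4 = [0, 1, 2, 3] := by decide
  have e : PySem.List.pyGet? (a0::a1::a2::a3::ra) ((2:Nat):Int) = some a2 := by
    rw [PySem.List.pyGet?_natCast]; rfl
  have f0 : PySem.List.pyGet? (b0::b1::b2::b3::rb) ((0:Nat):Int) = some b0 := by
    rw [PySem.List.pyGet?_natCast]; rfl
  have f1 : PySem.List.pyGet? (b0::b1::b2::b3::rb) ((1:Nat):Int) = some b1 := by
    rw [PySem.List.pyGet?_natCast]; rfl
  have f2 : PySem.List.pyGet? (b0::b1::b2::b3::rb) ((2:Nat):Int) = some b2 := by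
    rw [PySem.List.pyGet?_natCast]; rfl
  have f3 : PySem.List.pyGet? (b0::b1::b2::b3::rb) ((3:Nat):Int) = some b3 := by
    rw [PySem.List.pyGet?_natCast]; rfl
  simp only [rowA, h4, List.foldl_cons, List.foldl_nil, pasoA, e, f0, f1, f2, f3,
    Option.some.injEq, (show ((2:Nat) = 0) = False by simp), (show ((2:Nat) = 1) = False by simp), (show ((2:Nat) = 2) = True by simp), (show ((2:Nat) = 3) = False by simp), if_true, if_false]
  clear e f0 f1 f2 f3 h4
  refine ⟨?_, ?_, ?_⟩ <;> · split_ifs <;> simp_all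

lemma row_count3 (a0 a1 a2 a3 b0 b1 b2 b3 : Char) (ra rb : List Char) :
    (rowA (a0::a1::a2::a3::ra) (b0::b1::b2::b3::rb) 3).count 'B' = (if a3 = b3 then 1 else 0)
    ∧ (rowA (a0::a1::a2::a3::ra) (b0::b1::b2::b3::rb) 3).count 'R' = (if a3 = b0 then 1 else 0) + (if a3 = b1 then 1 else 0) + (if a3 = b2 then 1 else 0)
    ∧ (rowA (a0::a1::a2::a3::ra) (b0::b1::b2::b3::rb) 3).count 'M' = (if ¬(a3 = b0) ∧ ¬(a3 = b1) ∧ ¬(a3 = b2) ∧ ¬(a3 = b3) then 1 else 0) := by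
  have h4 : List.range 4 = [0, 1, 2, 3] := by decide
  have e : PySem.List.pyGet? (a0::a1::a2::a3::ra) ((3:Nat):Int) = some a3 := by
    rw [PySem.List.pyGet?_natCast]; rfl
  have f0 : PySem.List.pyGet? (b0::b1::b2::b3::rb) ((0:Nat):Int) = some b0 := by
    rw [PySem.List.pyGet?_natCast]; rfl
  have f1 : PySem.List.pyGet? (b0::b1::b2::b3::rb) ((1:Nat):Int) = some b1 := by
    rw [PySem.List.pyGet?_natCast]; rfl
  have f2 : PySem.List.pyGet? (b0::b1::b2::b3::rb) ((2:Nat):Int) = some b2 := by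
    rw [PySem.List.pyGet?_natCast]; rfl
  have f3 : PySem.List.pyGet? (b0::b1::b2::b3::rb) ((3:Nat):Int) = some b3 := by
    rw [PySem.List.pyGet?_natCast]; rfl
  simp only [rowA, h4, List.foldl_cons, List.foldl_nil, pasoA, e, f0, f1, f2, f3,
    Option.some.injEq, (show ((3:Nat) = 0) = False by simp), (show ((3:Nat) = 1) = False by simp), (show ((3:Nat) = 2) = False by simp), (show ((3:Nat) = 3) = True by simp), if_true, if_false]
  clear e f0 f1 f2 f3 h4
  refine ⟨?_, ?_, ?_⟩ <;> · split_ifs <;> simp_all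

lemma core_eq (a0 a1 a2 a3 b0 b1 b2 b3 : Char) (ra rb : List Char) :
    comparacionCore (a0::a1::a2::a3::ra) (b0::b1::b2::b3::rb)
      = comparacionAltCore (a0::a1::a2::a3::ra) (b0::b1::b2::b3::rb) := by
  obtain ⟨hB0, hR0, hM0⟩ := row_count0 a0 a1 a2 a3 b0 b1 b2 b3 ra rb
  obtain ⟨hB1, hR1, hM1⟩ := row_count1 a0 a1 a2 a3 b0 b1 b2 b3 ra rb
  obtain ⟨hB2, hR2, hM2⟩ := row_count2 a0 a1 a2 a3 b0 b1 b2 b3 ra rb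
  obtain ⟨hB3, hR3, hM3⟩ := row_count3 a0 a1 a2 a3 b0 b1 b2 b3 ra rb
  have h4 : List.range 4 = [0, 1, 2, 3] := by decide
  have e0 : PySem.List.pyGet? (a0::a1::a2::a3::ra) ((0:Nat):Int) = some a0 := by
    rw [PySem.List.pyGet?_natCast]; rfl
  have e1 : PySem.List.pyGet? (a0::a1::a2::a3::ra) ((1:Nat):Int) = some a1 := by
    rw [PySem.List.pyGet?_natCast]; rfl
  have e2 : PySem.List.pyGet? (a0::a1::a2::a3::ra) ((2:Nat):Int) = some a2 := by
    rw [PySem.List.pyGet?_natCast]; rfl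
  have e3 : PySem.List.pyGet? (a0::a1::a2::a3::ra) ((3:Nat):Int) = some a3 := by
    rw [PySem.List.pyGet?_natCast]; rfl
  have f0 : PySem.List.pyGet? (b0::b1::b2::b3::rb) ((0:Nat):Int) = some b0 := by
    rw [PySem.List.pyGet?_natCast]; rfl
  have f1 : PySem.List.pyGet? (b0::b1::b2::b3::rb) ((1:Nat):Int) = some b1 := by
    rw [PySem.List.pyGet?_natCast]; rfl
  have f2 : PySem.List.pyGet? (b0::b1::b2::b3::rb) ((2:Nat):Int) = some b2 := by
    rw [PySem.List.pyGet?_natCast]; rfl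
  have f3 : PySem.List.pyGet? (b0::b1::b2::b3::rb) ((3:Nat):Int) = some b3 := by
    rw [PySem.List.pyGet?_natCast]; rfl
  simp only [comparacionCore, si_eq, PySem.List.foldl_append_ite_eq_filter,
    (show (fun (x : Char) => decide (x = 'B')) = (· == 'B') from rfl),
    (show (fun (x : Char) => decide (x = 'R')) = (· == 'R') from rfl),
    (show (fun (x : Char) => decide (x = 'M')) = (· == 'M') from rfl),
    List.filter_beq, List.count_append, List.nil_append]
  rw [hB0, hB1, hB2, hB3, hR0, hR1, hR2, hR3, hM0, hM1, hM2, hM3]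
  simp only [comparacionAltCore, h4, List.countP_cons, List.countP_nil, List.map_cons,
    List.map_nil, List.sum_cons, List.sum_nil, List.all_cons, List.all_nil, e0, e1, e2, e3,
    f0, f1, f2, f3]
  simp
  congr 1
  · congr 1
    ring
  congr 1
  · congr 1
    ring
  · congr 1
    ring

-- ===== VERDICT (by name: the statement is the Claim_ definition above) =====
theorem comparacion_spec : Claim_equal_comparacion := by
  intro numero codigo_secreto _ hpre
  obtain ⟨h1, h2⟩ := hpre
  unfold Spec_comparacion
  obtain ⟨a0, a1, a2, a3, ra, hn⟩ : ∃ a0 a1 a2 a3 ra, numero.toList = a0 :: a1 :: a2 :: a3 :: ra := by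
    rcases hl : numero.toList with _ | ⟨x0, _ | ⟨x1, _ | ⟨x2, _ | ⟨x3, r⟩⟩⟩⟩ <;>
      simp [hl] at h1 ⊢
  obtain ⟨b0, b1, b2, b3, rb, hc⟩ : ∃ b0 b1 b2 b3 rb, codigo_secreto.toList = b0 :: b1 :: b2 :: b3 :: rb := by
    rcases hl : codigo_secreto.toList with _ | ⟨x0, _ | ⟨x1, _ | ⟨x2, _ | ⟨x3, r⟩⟩⟩⟩ <;>
      simp [hl] at h2 ⊢
  unfold comparacion comparacion_alt
  rw [hn, hc, core_eq]
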